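-- pv_equiv track=rewrite | github.com/ZJQxxn/Pacman_GM_Analysis | common_data/ExtractIncrementalData.py | _usefulSuicide
-- ===== SOURCE A (Python) =====
-- def _usefulSuicide(label_suicide):
--     suicide_count = 0
--     for index in list(range(len(label_suicide)-1, -1, -1)):
--         if label_suicide[index] == 1:
--             suicide_count += 1
--             if suicide_count == 5:
--                 return True
--         else:
--             if suicide_count == 5:
--                 return True
--             return False
--     return False
-- ===== SOURCE B (Python) =====
-- def _usefulSuicide(label_suicide):
--     run = 0
--     for x in label_suicide:
--         run = run + 1 if x == 1 else 0
--     return run >= 5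
-- ===== Notes on version B (the rewrite author's own statement) =====
-- stated objective: simpler
-- what changed: Replaces A's end-to-start early-exit scan (which materializes the full reversed index list and keeps a capped counter) by a single forward pass maintaining the length of the current trailing run of 1s (reset to 0 on any non-1), returning run >= 5.
import Mathlib
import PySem

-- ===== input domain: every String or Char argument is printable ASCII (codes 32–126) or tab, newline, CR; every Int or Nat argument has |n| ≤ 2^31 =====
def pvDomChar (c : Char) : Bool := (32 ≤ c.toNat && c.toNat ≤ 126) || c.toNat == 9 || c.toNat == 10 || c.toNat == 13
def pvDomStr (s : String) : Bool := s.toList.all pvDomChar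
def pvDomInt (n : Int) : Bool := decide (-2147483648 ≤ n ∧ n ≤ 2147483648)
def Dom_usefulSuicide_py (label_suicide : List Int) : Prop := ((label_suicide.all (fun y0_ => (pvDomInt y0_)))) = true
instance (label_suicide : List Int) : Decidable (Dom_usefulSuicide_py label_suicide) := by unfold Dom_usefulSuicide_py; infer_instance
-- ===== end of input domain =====

-- B replaces A's end-to-start counting scan by a single forward pass tracking the current trailing run of 1s (objective: simpler).


-- ===== PORT A =====
-- the for-loop over list(range(len(xs)-1, -1, -1)) with the running suicide_count and early returns
def usefulSuicideLoop (xs : List Int) : List Int → Int → Bool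
  | [], _ => false                                   -- loop ends: return False
  | i :: rest, suicide_count =>
    match PySem.List.pyGet? xs i with
    | none => false                                  -- unreachable: every index from range(len-1,-1,-1) is in range
    | some v =>
      if v = 1 then
        if suicide_count + 1 = 5 then true
        else usefulSuicideLoop xs rest (suicide_count + 1)
      else
        if suicide_count = 5 then true else false

def usefulSuicide_py (label_suicide : List Int) : Bool :=
  usefulSuicideLoop label_suicide
    (PySem.List.pyRange ((label_suicide.length : Int) - 1) (-1) (-1)) 0

-- ===== PORT B =====
-- forward pass: run = length of the current trailing run of 1s, reset on any non-1
def usefulSuicide_py_alt (label_suicide : List Int) : Bool :=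
  decide (5 ≤ label_suicide.foldl (fun run x => if x = 1 then run + 1 else 0) (0 : Int))

-- ===== PRECONDITION & SPEC =====
def Spec_usefulSuicide_py (label_suicide : List Int) (out : Bool) : Prop := out = usefulSuicide_py_alt label_suicide
instance (label_suicide : List Int) (out : Bool) : Decidable (Spec_usefulSuicide_py label_suicide out) := by unfold Spec_usefulSuicide_py; infer_instance

-- ===== CLAIM (what is proved, stated in full; the proofs are below) =====
def Claim_equal_usefulSuicide_py : Prop := ∀ (label_suicide : List Int), Dom_usefulSuicide_py label_suicide → Spec_usefulSuicide_py label_suicide (usefulSuicide_py label_suicide)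

-- ===== LEMMAS AND PROOFS =====

-- abstract version of A's loop over the already-reversed suffix of the list
def pvScan : List Int → Int → Bool
  | [], _ => false
  | y :: ys, c =>
    if y = 1 then (if c + 1 = 5 then true else pvScan ys (c + 1))
    else (if c = 5 then true else false)

theorem usefulSuicideLoop_eq_pvScan (xs : List Int) (k : Nat) (hk : k ≤ xs.length) (c : Int) :
    usefulSuicideLoop xs (PySem.List.pyRange ((k : Int) - 1) (-1) (-1)) c
      = pvScan (xs.take k).reverse c := by
  induction k generalizing c with
  | zero =>
      rw [PySem.List.pyRange_neg_one_eq_nil (by omega)]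
      simp [usefulSuicideLoop, pvScan]
  | succ k ih =>
      rw [show ((k + 1 : Nat) : Int) - 1 = (k : Int) by push_cast; ring,
          PySem.List.pyRange_neg_one_cons (by omega)]
      have hklt : k < xs.length := by omega
      have hget : PySem.List.pyGet? xs (k : Int) = some (xs[k]) := by
        simp [PySem.List.pyGet?, PySem.List.pyIdx?, hklt]
      have htake : (xs.take (k + 1)).reverse = xs[k] :: (xs.take k).reverse := by
        rw [List.take_add_one, List.getElem?_eq_getElem hklt]
        simp
      rw [htake]
      simp only [usefulSuicideLoop, hget, pvScan]
      by_cases h1 : xs[k] = 1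
      · simp only [h1]
        by_cases h5 : c + 1 = 5
        · simp [h5]
        · simp only [if_neg h5]
          exact ih (by omega) (c + 1)
      · simp [h1]

-- length of the leading run of 1s (= trailing run of the original order, seen reversed)
def rcount : List Int → Int
  | [] => 0
  | y :: l => if y = 1 then rcount l + 1 else 0

theorem rcount_nonneg (l : List Int) : 0 ≤ rcount l := by
  cases l with
  | nil => simp [rcount]
  | cons y l =>
      by_cases h : y = 1
      · simp only [rcount, if_pos h]
        have := rcount_nonneg l
        omega
      · simp [rcount, h]

-- B's forward fold computes the trailing-run length, i.e. rcount of the reversed list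
theorem foldl_run_eq_rcount (xs : List Int) :
    xs.foldl (fun run x => if x = 1 then run + 1 else 0) (0 : Int) = rcount xs.reverse := by
  induction xs using List.reverseRecOn with
  | nil => simp [rcount]
  | append_singleton xs y ih =>
      rw [List.foldl_append, List.foldl_cons, List.foldl_nil, ih,
          List.reverse_append]
      simp [rcount]

-- A's closed-form check against the reversed list, as a bound on rcount
theorem rcount_threshold (l : List Int) (k : Nat) :
    decide ((k : Int) ≤ rcount l)
      = (decide (k ≤ l.length) && (l.take k).all (fun x => decide (x = 1))) := by
  induction l generalizing k with
  | nil =>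
      cases k with
      | zero => simp [rcount]
      | succ k => simp [rcount]
  | cons y l ih =>
      cases k with
      | zero =>
          have := rcount_nonneg (y :: l)
          simp
          omega
      | succ k =>
          by_cases h : y = 1
          · have h1 : rcount (y :: l) = rcount l + 1 := by simp [rcount, h]
            have h2 : ((k + 1 : Nat) : Int) ≤ rcount l + 1 ↔ (k : Int) ≤ rcount l := by
              push_cast; omega
            rw [h1, decide_eq_decide.mpr h2, ih k]
            simp [h]
          · simp only [rcount, if_neg h, List.take_succ_cons, List.all_cons]
            have h0 : ¬ ((k + 1 : Nat) : Int) ≤ (0 : Int) := by push_cast; omega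
            simp [h]

-- pvScan at counter c is the closed-form "next 5-c elements exist and are all 1"
theorem pvScan_closed (ys : List Int) : ∀ c : Int, 0 ≤ c → c < 5 →
    pvScan ys c
      = (decide (5 - c ≤ (ys.length : Int)) && (ys.take (5 - c).toNat).all (fun x => decide (x = 1))) := by
  induction ys with
  | nil =>
      intro c h0 h5
      simp [pvScan]
      omega
  | cons y ys ih =>
      intro c h0 h5
      by_cases h1 : y = 1
      · by_cases hc : c + 1 = 5
        · have : (5 - c).toNat = 1 := by omega
          simp [pvScan, h1, hc, this]
          omega
        · have hrec := ih (c + 1) (by omega) (by omega)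
          have ht : (5 - c).toNat = (5 - (c + 1)).toNat + 1 := by omega
          simp only [pvScan, h1, if_neg hc, hrec, ht, List.take_succ_cons,
            List.all_cons]
          have hlen : (5 - (c + 1) ≤ ((ys.length : Nat) : Int)) ↔ (5 - c ≤ ((y :: ys).length : Int)) := by
            simp; omega
          simp [h1, hlen]
      · have hc5 : ¬ c = 5 := by omega
        have ht : ∃ m, (5 - c).toNat = m + 1 := ⟨(5 - c).toNat - 1, by omega⟩
        obtain ⟨m, hm⟩ := ht
        simp [pvScan, h1, hc5, hm]

-- ===== VERDICT (by name: the statement is the Claim_ definition above) =====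
theorem usefulSuicide_py_spec : Claim_equal_usefulSuicide_py := by
  intro xs _
  show usefulSuicide_py xs = usefulSuicide_py_alt xs
  unfold usefulSuicide_py usefulSuicide_py_alt
  rw [usefulSuicideLoop_eq_pvScan xs xs.length (le_refl _) 0, List.take_length,
      pvScan_closed xs.reverse 0 (by omega) (by omega),
      foldl_run_eq_rcount xs]
  have h := rcount_threshold xs.reverse 5
  have hc : (((5:Nat)) : Int) = (5 : Int) := by norm_num
  rw [hc] at h
  have hd : decide ((5:Int) ≤ (xs.reverse.length : Int)) = decide (5 ≤ xs.reverse.length) :=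
    decide_eq_decide.mpr (by exact_mod_cast Iff.rfl)
  rw [show ((5:Int) - 0) = (5:Int) by norm_num, show ((5:Int)).toNat = 5 from rfl, hd]
  exact h.symm
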